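-- pv_equiv track=rewrite | github.com/coroianpetruta/Masters-Practical-Work | timeline_model.py | kind_from_labels
-- ===== SOURCE A (Python) =====
-- from typing import Any, Dict, List, Optional, Set, Tuple
--
-- def kind_from_labels(labels: List[str]) -> Optional[str]:
--     lowered = [
--         str(lbl).lower()
--         for lbl in labels
--         if str(lbl).lower() not in {"entity", "episodic", "community", "saga"}
--     ]
--     if any("player" in lbl for lbl in lowered):
--         return "player"
--     if any("team" in lbl for lbl in lowered):
--         return "team"
--     if any("coach" in lbl for lbl in lowered):
--         return "coach"
--     if lowered:
--         return lowered[0]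
--     return None
-- ===== SOURCE B (Python) =====
-- def kind_from_labels(labels):
--     skip = {"entity", "episodic", "community", "saga"}
--     first = None
--     has_player = has_team = has_coach = False
--     for lbl in labels:
--         s = str(lbl).lower()
--         if s in skip:
--             continue
--         if first is None:
--             first = s
--         has_player = has_player or "player" in s
--         has_team = has_team or "team" in s
--         has_coach = has_coach or "coach" in s
--     if has_player:
--         return "player"
--     if has_team:
--         return "team"
--     if has_coach:
--         return "coach"
--     return first
-- ===== Notes on version B (the rewrite author's own statement) =====
-- stated objective: simpler
-- what changed: Replaces the intermediate filtered list plus three separate any-scans by a single pass over labels that accumulates the first kept label and three boolean flags.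
import Mathlib
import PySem

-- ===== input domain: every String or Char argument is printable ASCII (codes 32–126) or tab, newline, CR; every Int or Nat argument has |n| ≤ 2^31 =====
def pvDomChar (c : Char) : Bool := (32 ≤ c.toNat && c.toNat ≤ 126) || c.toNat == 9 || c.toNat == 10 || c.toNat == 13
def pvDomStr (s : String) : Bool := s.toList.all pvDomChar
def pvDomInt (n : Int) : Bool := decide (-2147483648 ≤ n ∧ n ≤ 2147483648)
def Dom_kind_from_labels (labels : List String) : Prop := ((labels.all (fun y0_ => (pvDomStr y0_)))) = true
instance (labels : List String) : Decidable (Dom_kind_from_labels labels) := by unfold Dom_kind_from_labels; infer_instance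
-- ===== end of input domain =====

-- B replaces A's intermediate filtered list and three separate any-scans by one fold
-- accumulating the first kept label and three boolean flags (objective: simpler).


-- ===== PORT A =====
def kind_from_labels (labels : List String) : Option String :=
  let lowered := labels.filterMap (fun lbl =>
    let s := PySem.Str.lower lbl
    if s ∈ (["entity", "episodic", "community", "saga"] : List String) then none else some s)
  if lowered.any (fun l => PySem.Str.isIn "player" l) then some "player"
  else if lowered.any (fun l => PySem.Str.isIn "team" l) then some "team"
  else if lowered.any (fun l => PySem.Str.isIn "coach" l) then some "coach"
  else match lowered with
    | [] => none
    | x :: _ => some x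

-- ===== PORT B =====
-- loop body of B: state = (first, has_player, has_team, has_coach)
def kflStep (st : Option String × Bool × Bool × Bool) (lbl : String) :
    Option String × Bool × Bool × Bool :=
  let s := PySem.Str.lower lbl
  if s ∈ (["entity", "episodic", "community", "saga"] : List String) then st
  else
    ((if st.1.isNone then some s else st.1),
     st.2.1 || PySem.Str.isIn "player" s,
     st.2.2.1 || PySem.Str.isIn "team" s,
     st.2.2.2 || PySem.Str.isIn "coach" s)

def kind_from_labels_alt (labels : List String) : Option String :=
  let st := labels.foldl kflStep (none, false, false, false)
  if st.2.1 then some "player"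
  else if st.2.2.1 then some "team"
  else if st.2.2.2 then some "coach"
  else st.1

-- ===== PRECONDITION & SPEC =====
def Spec_kind_from_labels (labels : List String) (out : Option String) : Prop := out = kind_from_labels_alt labels
instance (labels : List String) (out : Option String) : Decidable (Spec_kind_from_labels labels out) := by unfold Spec_kind_from_labels; infer_instance

-- ===== CLAIM (what is proved, stated in full; the proofs are below) =====
def Claim_equal_kind_from_labels : Prop := ∀ (labels : List String), Dom_kind_from_labels labels → Spec_kind_from_labels labels (kind_from_labels labels)

-- ===== LEMMAS AND PROOFS =====

-- A's filtered-and-lowered list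
def kflLowered (labels : List String) : List String :=
  labels.filterMap (fun lbl =>
    let s := PySem.Str.lower lbl
    if s ∈ (["entity", "episodic", "community", "saga"] : List String) then none else some s)

lemma kfl_fold_char (labels : List String) (st : Option String × Bool × Bool × Bool) :
    labels.foldl kflStep st =
      ((if st.1.isNone then (kflLowered labels).head? else st.1),
       st.2.1 || (kflLowered labels).any (fun l => PySem.Str.isIn "player" l),
       st.2.2.1 || (kflLowered labels).any (fun l => PySem.Str.isIn "team" l),
       st.2.2.2 || (kflLowered labels).any (fun l => PySem.Str.isIn "coach" l)) := by
  induction labels generalizing st with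
  | nil => obtain ⟨f, hp, ht, hc⟩ := st; cases f <;> simp [kflLowered]
  | cons lbl rest ih =>
    simp only [List.foldl_cons, kflLowered, List.filterMap_cons]
    by_cases h : PySem.Str.lower lbl ∈ (["entity", "episodic", "community", "saga"] : List String)
    · simp only [kflStep, h, if_pos]
      simpa [kflLowered] using ih st
    · simp only [kflStep, h, if_false]
      rw [ih]
      obtain ⟨f, hp, ht, hc⟩ := st
      cases f <;> simp [kflLowered, Bool.or_assoc]

theorem kind_from_labels_spec : Claim_equal_kind_from_labels := by
  intro labels _
  show kind_from_labels labels = kind_from_labels_alt labels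
  simp only [kind_from_labels, kind_from_labels_alt, kfl_fold_char,
    Option.isNone_none, if_pos, Bool.false_or]
  have : labels.filterMap (fun lbl =>
      let s := PySem.Str.lower lbl
      if s ∈ (["entity", "episodic", "community", "saga"] : List String) then none else some s)
      = kflLowered labels := rfl
  rw [this]
  cases kflLowered labels <;> simp
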